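-- pv_equiv track=rewrite | github.com/GralhaJ/PUC-Rio | Modelagem e Programação/Recursão/ExCasaRecursao1_EX3.py | aparece
-- ===== SOURCE A (Python) =====
-- def aparece(n):
--     if n < 10:
--         if n == 3 or n == 4:
--             return 1
--         return 0
--     if n % 10 == 3 or n % 10 == 4:
--         return 1 + aparece(n//10)
--     return aparece(n//10)
-- ===== SOURCE B (Python) =====
-- def aparece(n):
--     count = 0
--     while n >= 10:
--         if n % 10 in (3, 4):
--             count += 1
--         n //= 10
--     if n == 3 or n == 4:
--         count += 1
--     return count
-- ===== Notes on version B (the rewrite author's own statement) =====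
-- stated objective: alternative
-- what changed: Replaced the recursion with an explicit while-loop peeling digits into an accumulator, with the single-digit check applied after the loop.
import Mathlib
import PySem

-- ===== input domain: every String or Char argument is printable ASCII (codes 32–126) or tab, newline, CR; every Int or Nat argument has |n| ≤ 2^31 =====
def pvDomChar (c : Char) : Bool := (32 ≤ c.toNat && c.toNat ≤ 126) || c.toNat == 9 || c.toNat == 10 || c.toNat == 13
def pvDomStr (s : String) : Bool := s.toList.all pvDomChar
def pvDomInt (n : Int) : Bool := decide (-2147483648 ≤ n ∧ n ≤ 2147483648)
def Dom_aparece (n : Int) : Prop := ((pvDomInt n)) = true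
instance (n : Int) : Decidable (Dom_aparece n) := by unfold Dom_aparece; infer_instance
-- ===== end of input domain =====

-- B replaces A's recursion with an explicit digit-peeling loop and an accumulator (alternative decomposition, same cost).


-- termination helper for both ports: peeling a digit shrinks n (for n ≥ 10)
theorem pvFloordiv10_toNat_lt (n : Int) (h : ¬ n < 10) :
    (PySem.Int.floordiv n 10).toNat < n.toNat := by
  rw [PySem.Int.floordiv_eq_ediv_of_pos (by omega)]
  omega

-- ===== PORT A =====
def aparece (n : Int) : Int :=
  if h : n < 10 then
    if n = 3 ∨ n = 4 then 1 else 0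
  else if PySem.Int.mod n 10 = 3 ∨ PySem.Int.mod n 10 = 4 then
    1 + aparece (PySem.Int.floordiv n 10)
  else
    aparece (PySem.Int.floordiv n 10)
termination_by n.toNat
decreasing_by all_goals exact pvFloordiv10_toNat_lt n h

-- ===== PORT B =====
-- the while-loop of Source B: state (n, count)
def apareceLoop (n : Int) (count : Int) : Int :=
  if h : n ≥ 10 then
    apareceLoop (PySem.Int.floordiv n 10)
      (if PySem.Int.mod n 10 = 3 ∨ PySem.Int.mod n 10 = 4 then count + 1 else count)
  else
    count
termination_by n.toNat
decreasing_by exact pvFloordiv10_toNat_lt n (by omega)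

-- final value of n after Source B's loop (the remaining leading digit, or n itself if n < 10)
def apareceFinal (n : Int) : Int :=
  if h : n ≥ 10 then apareceFinal (PySem.Int.floordiv n 10) else n
termination_by n.toNat
decreasing_by exact pvFloordiv10_toNat_lt n (by omega)

def aparece_alt (n : Int) : Int :=
  let count := apareceLoop n 0
  if n < 10 then
    -- loop left n unchanged; final single-digit check (Source B rebinds n, the loop result over digits < 10 is count itself)
    if n = 3 ∨ n = 4 then count + 1 else count
  else
    -- after the loop the remaining n is the leading digit
    if apareceFinal n = 3 ∨ apareceFinal n = 4 then count + 1 else count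

-- ===== PRECONDITION & SPEC =====
def Spec_aparece (n : Int) (out : Int) : Prop := out = aparece_alt n
instance (n : Int) (out : Int) : Decidable (Spec_aparece n out) := by unfold Spec_aparece; infer_instance

-- ===== CLAIM (what is proved, stated in full; the proofs are below) =====
def Claim_equal_aparece : Prop := ∀ (n : Int), Dom_aparece n → Spec_aparece n (aparece n)

-- ===== LEMMAS AND PROOFS =====
theorem apareceLoop_eq (n : Int) (count : Int) :
    apareceLoop n count + (if apareceFinal n = 3 ∨ apareceFinal n = 4 then 1 else 0)
      = count + aparece n := by
  by_cases h : n ≥ 10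
  · rw [apareceLoop, apareceFinal, aparece]
    simp only [h, dif_pos, dif_neg (by omega : ¬ n < 10)]
    have h1 := apareceLoop_eq (PySem.Int.floordiv n 10) (count + 1)
    have h2 := apareceLoop_eq (PySem.Int.floordiv n 10) count
    split_ifs at h1 h2 ⊢ <;> omega
  · rw [apareceLoop, apareceFinal, aparece]
    rw [dif_neg h, dif_neg h, dif_pos (show n < 10 by omega)]
termination_by n.toNat
decreasing_by all_goals exact pvFloordiv10_toNat_lt n (by omega)

-- ===== VERDICT (by name: the statement is the Claim_ definition above) =====
theorem aparece_spec : Claim_equal_aparece := by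
  intro n _
  unfold Spec_aparece aparece_alt
  by_cases h : n < 10
  · have hl : apareceLoop n 0 = 0 := by rw [apareceLoop]; simp [show ¬ n ≥ 10 by omega]
    rw [aparece]
    simp only [h, if_pos, dif_pos, hl]
    split_ifs <;> omega
  · have := apareceLoop_eq n 0
    simp only [if_neg h]
    split_ifs with hf <;> simp [hf] at this <;> omega
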